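-- pv_equiv track=rewrite | github.com/rmrsint/TI2BioP | TI2BioP.py | checktouch
-- ===== SOURCE A (Python) =====
-- def checktouch(cluster00, cluster01):
--     contact = 0
--     cluster1 = cluster00[0]
--     cluster2 = list(cluster01[0])
--
--     for elem in cluster1:
--         row, col = elem
--         if (row + 1, col) in cluster2:
--             contact = 1
--         if (row - 1, col) in cluster2:
--             contact = 1
--         if (row, col + 1) in cluster2:
--             contact = 1
--         if (row, col - 1) in cluster2:
--             contact = 1
--     return contact
-- ===== SOURCE B (Python) =====
-- def checktouch(cluster00, cluster01):
--     cluster1 = cluster00[0]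
--     cluster2 = list(cluster01[0])
--     return int(any(abs(r1 - r2) + abs(c1 - c2) == 1
--                    for r1, c1 in cluster1
--                    for r2, c2 in cluster2))
-- ===== Notes on version B (the rewrite author's own statement) =====
-- stated objective: simpler
-- what changed: Instead of latching a flag while testing membership of four shifted copies of each cell in the other cluster's list, B tests 4-adjacency arithmetically: it asks whether any pair of cells (one from each cluster) has Manhattan distance exactly 1, as a single any() expression.
import Mathlib
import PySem

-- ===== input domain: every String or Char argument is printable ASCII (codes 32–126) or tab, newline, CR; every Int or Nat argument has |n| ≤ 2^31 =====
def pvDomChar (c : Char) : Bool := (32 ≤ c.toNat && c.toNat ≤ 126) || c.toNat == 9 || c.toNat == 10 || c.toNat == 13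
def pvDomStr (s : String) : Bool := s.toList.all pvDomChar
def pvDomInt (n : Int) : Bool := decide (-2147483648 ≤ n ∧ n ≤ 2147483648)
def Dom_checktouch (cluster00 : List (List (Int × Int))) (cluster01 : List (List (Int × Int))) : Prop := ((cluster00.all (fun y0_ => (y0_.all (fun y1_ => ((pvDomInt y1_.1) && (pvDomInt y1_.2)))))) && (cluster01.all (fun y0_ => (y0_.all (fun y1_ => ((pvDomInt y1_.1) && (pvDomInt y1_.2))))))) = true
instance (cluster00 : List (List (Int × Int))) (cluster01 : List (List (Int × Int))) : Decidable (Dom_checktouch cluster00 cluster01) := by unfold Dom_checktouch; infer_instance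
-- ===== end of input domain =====

-- B replaces A's flag-latching loop with four shifted-membership tests by a single pairwise
-- any() over both clusters testing Manhattan distance = 1 (objective: simpler).


-- ===== PORT A =====
def checktouch (cluster00 : List (List (Int × Int))) (cluster01 : List (List (Int × Int))) : Int :=
  let cluster1 := (PySem.List.pyGet? cluster00 0).getD []
  let cluster2 := (PySem.List.pyGet? cluster01 0).getD []
  cluster1.foldl (fun contact elem =>
    let row := elem.1
    let col := elem.2
    let contact := if cluster2.contains (row + 1, col) then 1 else contact
    let contact := if cluster2.contains (row - 1, col) then 1 else contact
    let contact := if cluster2.contains (row, col + 1) then 1 else contact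
    if cluster2.contains (row, col - 1) then 1 else contact) 0

-- ===== PORT B =====
def checktouch_alt (cluster00 : List (List (Int × Int))) (cluster01 : List (List (Int × Int))) : Int :=
  let cluster1 := (PySem.List.pyGet? cluster00 0).getD []
  let cluster2 := (PySem.List.pyGet? cluster01 0).getD []
  if cluster1.any (fun p =>
       cluster2.any (fun q => (p.1 - q.1).natAbs + (p.2 - q.2).natAbs == 1)) then 1 else 0

-- ===== PRECONDITION & SPEC =====
-- A raises IndexError (cluster00[0] / cluster01[0]) when either argument is the empty list.
def Pre_checktouch (cluster00 : List (List (Int × Int))) (cluster01 : List (List (Int × Int))) : Prop :=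
  cluster00 ≠ [] ∧ cluster01 ≠ []
instance (cluster00 : List (List (Int × Int))) (cluster01 : List (List (Int × Int))) : Decidable (Pre_checktouch cluster00 cluster01) := by unfold Pre_checktouch; infer_instance
def pvWitness_checktouch : (List (List (Int × Int))) × (List (List (Int × Int))) := ([[(0, 0)]], [[(1, 0)]])
def Spec_checktouch (cluster00 : List (List (Int × Int))) (cluster01 : List (List (Int × Int))) (out : Int) : Prop := out = checktouch_alt cluster00 cluster01
instance (cluster00 : List (List (Int × Int))) (cluster01 : List (List (Int × Int))) (out : Int) : Decidable (Spec_checktouch cluster00 cluster01 out) := by unfold Spec_checktouch; infer_instance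

-- ===== CLAIM (what is proved, stated in full; the proofs are below) =====
def Claim_equal_checktouch : Prop := ∀ (cluster00 : List (List (Int × Int))) (cluster01 : List (List (Int × Int))), Dom_checktouch cluster00 cluster01 → Pre_checktouch cluster00 cluster01 → Spec_checktouch cluster00 cluster01 (checktouch cluster00 cluster01)

-- ===== LEMMAS AND PROOFS =====

-- whether some 4-neighbour of p lies in l2 (the per-cell test of A's loop body)
def pvNear (l2 : List (Int × Int)) (p : Int × Int) : Bool :=
  l2.contains (p.1 + 1, p.2) || l2.contains (p.1 - 1, p.2) ||
  l2.contains (p.1, p.2 + 1) || l2.contains (p.1, p.2 - 1)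

lemma checktouch_loop (l2 : List (Int × Int)) (l1 : List (Int × Int)) (c : Int) :
    l1.foldl (fun contact elem =>
      let row := elem.1
      let col := elem.2
      let contact := if l2.contains (row + 1, col) then 1 else contact
      let contact := if l2.contains (row - 1, col) then 1 else contact
      let contact := if l2.contains (row, col + 1) then 1 else contact
      if l2.contains (row, col - 1) then (1 : Int) else contact) c
    = if l1.any (pvNear l2) then 1 else c := by
  induction l1 generalizing c with
  | nil => simp
  | cons p l1 ih =>
    rw [List.foldl_cons, ih]
    by_cases h : l1.any (pvNear l2) = true
    · simp [h]
    · simp only [List.any_cons, h, Bool.or_false]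
      unfold pvNear
      split_ifs <;> simp_all

lemma pvNear_eq_any_manhattan (l2 : List (Int × Int)) (p : Int × Int) :
    pvNear l2 p = l2.any (fun q => (p.1 - q.1).natAbs + (p.2 - q.2).natAbs == 1) := by
  rw [Bool.eq_iff_iff]
  simp only [pvNear, Bool.or_eq_true, List.contains_iff_mem, List.any_eq_true, beq_iff_eq]
  constructor
  · rintro (((h | h) | h) | h)
    · exact ⟨(p.1 + 1, p.2), h, by simp⟩
    · exact ⟨(p.1 - 1, p.2), h, by simp⟩
    · exact ⟨(p.1, p.2 + 1), h, by simp⟩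
    · exact ⟨(p.1, p.2 - 1), h, by simp⟩
  · rintro ⟨⟨a, b⟩, hm, hd⟩
    have : (a, b) = (p.1 + 1, p.2) ∨ (a, b) = (p.1 - 1, p.2) ∨
        (a, b) = (p.1, p.2 + 1) ∨ (a, b) = (p.1, p.2 - 1) := by
      simp only [Prod.ext_iff] at *; omega
    rcases this with h | h | h | h <;> rw [h] at hm <;> tauto

-- ===== VERDICT (by name: the statement is the Claim_ definition above) =====
theorem checktouch_spec : Claim_equal_checktouch := by
  intro cluster00 cluster01 _ _
  unfold Spec_checktouch checktouch checktouch_alt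
  rw [checktouch_loop]
  rw [funext (pvNear_eq_any_manhattan ((PySem.List.pyGet? cluster01 0).getD []))]
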